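-- pv_equiv track=rewrite | github.com/imastuido/ima-all-ai | scripts/ima_runtime/shared/rule_resolution.py | select_credit_rule_by_params
-- ===== SOURCE A (Python) =====
-- def select_credit_rule_by_params(credit_rules: list, user_params: dict) -> dict | None:
--     """
--     Select the best credit_rule matching user parameters.
--
--     Strategy:
--     1. Try exact match: all rule attributes match user params
--     2. Try best partial match
--     3. Fallback to first rule
--     """
--     if not credit_rules:
--         return None
--
--     default_rule = next(
--         (
--             rule
--             for rule in credit_rules
--             if (rule.get("attributes") or {}).get("default") == "enabled"
--         ),
--         None,
--     )
--
--     if not user_params: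
--         return default_rule or credit_rules[0]
--
--     def normalize_value(value):
--         if isinstance(value, bool):
--             return str(value).lower()
--         return str(value).strip().upper()
--
--     normalized_user = {
--         key.lower().strip(): normalize_value(value)
--         for key, value in user_params.items()
--     }
--
--     for rule in credit_rules:
--         attrs = rule.get("attributes", {})
--         if not attrs:
--             continue
--         if attrs.get("default") == "enabled":
--             continue
--
--         normalized_attrs = {
--             key.lower().strip(): normalize_value(value)
--             for key, value in attrs.items()
--         }
--         if all(normalized_user.get(key) == value for key, value in normalized_attrs.items()):
--             return rule
--
--     best_match = None
--     best_match_count = 0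
--     for rule in credit_rules:
--         attrs = rule.get("attributes", {})
--         if not attrs:
--             continue
--         if attrs.get("default") == "enabled":
--             continue
--
--         normalized_attrs = {
--             key.lower().strip(): normalize_value(value)
--             for key, value in attrs.items()
--         }
--         match_count = sum(
--             1
--             for key, value in normalized_attrs.items()
--             if normalized_user.get(key) == value
--         )
--         if match_count > best_match_count:
--             best_match_count = match_count
--             best_match = rule
--
--     if best_match:
--         return best_match
--
--     return default_rule or credit_rules[0]
-- ===== SOURCE B (Python) =====
-- def select_credit_rule_by_params(credit_rules: list, user_params: dict) -> dict | None:
--     """Single-pass variant: one scan computes both the exact match (early return)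
--     and the best partial match, instead of two separate full scans."""
--     if not credit_rules:
--         return None
--
--     default_rule = next(
--         (
--             rule
--             for rule in credit_rules
--             if (rule.get("attributes") or {}).get("default") == "enabled"
--         ),
--         None,
--     )
--     fallback = default_rule or credit_rules[0]
--
--     if not user_params:
--         return fallback
--
--     def normalize_value(value):
--         if isinstance(value, bool):
--             return str(value).lower()
--         return str(value).strip().upper()
--
--     normalized_user = {
--         key.lower().strip(): normalize_value(value)
--         for key, value in user_params.items()
--     }
--
--     best_match = None
--     best_match_count = 0
--     for rule in credit_rules:
--         attrs = rule.get("attributes", {})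
--         if not attrs or attrs.get("default") == "enabled":
--             continue
--         normalized_attrs = {
--             key.lower().strip(): normalize_value(value)
--             for key, value in attrs.items()
--         }
--         match_count = sum(
--             1
--             for key, value in normalized_attrs.items()
--             if normalized_user.get(key) == value
--         )
--         if match_count == len(normalized_attrs):
--             return rule
--         if match_count > best_match_count:
--             best_match_count = match_count
--             best_match = rule
--
--     return best_match if best_match else fallback
-- ===== Notes on version B (the rewrite author's own statement) =====
-- stated objective: simpler
-- what changed: A's two separate full scans (exact-match scan, then best-partial scan, each re-normalizing every rule's attributes) are merged into one single pass that returns immediately on an exact match and otherwise tracks the best partial match.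
import Mathlib
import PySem

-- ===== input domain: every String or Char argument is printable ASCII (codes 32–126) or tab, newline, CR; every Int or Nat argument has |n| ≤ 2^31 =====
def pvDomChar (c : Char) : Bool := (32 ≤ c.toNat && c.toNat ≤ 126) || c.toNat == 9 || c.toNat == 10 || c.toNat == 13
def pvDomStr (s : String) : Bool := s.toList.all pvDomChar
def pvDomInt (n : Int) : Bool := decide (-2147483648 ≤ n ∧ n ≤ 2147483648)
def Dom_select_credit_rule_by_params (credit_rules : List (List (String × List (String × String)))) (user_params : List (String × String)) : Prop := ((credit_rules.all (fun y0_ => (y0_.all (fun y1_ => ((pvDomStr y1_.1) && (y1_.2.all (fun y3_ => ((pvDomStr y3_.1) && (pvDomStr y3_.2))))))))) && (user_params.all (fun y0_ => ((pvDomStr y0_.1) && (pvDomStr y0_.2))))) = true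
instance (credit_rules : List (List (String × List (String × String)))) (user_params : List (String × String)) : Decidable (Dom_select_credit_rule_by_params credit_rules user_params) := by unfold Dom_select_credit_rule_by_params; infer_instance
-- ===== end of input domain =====

-- B merges A's two full scans (exact-match scan, then best-partial scan) into one
-- pass with an early return on an exact match; return value only, neither program mutates.

-- ===== PORT A =====
-- shared: Python dict lookup d.get(k) on an association list (first match)
def pvAget {α : Type} (d : List (String × α)) (k : String) : Option α :=
  (PySem.Dict.mk d).get? k

-- shared: normalize_value(value) for string values (the bool branch is unreachable on this type)
def pvNormVal (v : String) : String := PySem.Str.upper (PySem.Str.strip v)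

-- shared: {key.lower().strip(): normalize_value(value) for key, value in d.items()}
def pvNormDict (d : List (String × String)) : PySem.Dict String String :=
  d.foldl (fun acc p => acc.insert (PySem.Str.strip (PySem.Str.lower p.1)) (pvNormVal p.2)) PySem.Dict.empty

-- shared: 'default_rule or credit_rules[0]' (a found default rule is a nonempty dict, but the
-- Python tests truthiness, so the port does too)
def pvOrFirst (default_rule : Option (List (String × List (String × String)))) (credit_rules : List (List (String × List (String × String)))) : Option (List (String × List (String × String))) :=
  match default_rule with
  | some d => if d = [] then some (PySem.List.pyGetD credit_rules 0 []) else some d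
  | none => some (PySem.List.pyGetD credit_rules 0 [])

-- A, first loop: return the first non-default rule all of whose normalized attrs match
def aPhase1 (rules : List (List (String × List (String × String)))) (nu : PySem.Dict String String) : Option (List (String × List (String × String))) :=
  match rules with
  | [] => none
  | r :: rs =>
    let attrs := (pvAget r "attributes").getD []
    if attrs = [] then aPhase1 rs nu
    else if pvAget attrs "default" == some "enabled" then aPhase1 rs nu
    else
      let na := pvNormDict attrs
      if na.items.all (fun p => nu.get? p.1 == some p.2) then some r
      else aPhase1 rs nu

-- A, second loop: best partial match (strict '>', so the first rule with the maximal count wins)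
def aPhase2 (rules : List (List (String × List (String × String)))) (nu : PySem.Dict String String) (best : Option (List (String × List (String × String)))) (cnt : Int) : Option (List (String × List (String × String))) :=
  match rules with
  | [] => best
  | r :: rs =>
    let attrs := (pvAget r "attributes").getD []
    if attrs = [] then aPhase2 rs nu best cnt
    else if pvAget attrs "default" == some "enabled" then aPhase2 rs nu best cnt
    else
      let na := pvNormDict attrs
      let mc : Int := (na.items.countP (fun p => nu.get? p.1 == some p.2) : Int)
      if mc > cnt then aPhase2 rs nu (some r) mc else aPhase2 rs nu best cnt

def select_credit_rule_by_params (credit_rules : List (List (String × List (String × String)))) (user_params : List (String × String)) : Option (List (String × List (String × String))) :=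
  if credit_rules = [] then none
  else
    let default_rule := credit_rules.find? (fun rule => pvAget ((pvAget rule "attributes").getD []) "default" == some "enabled")
    if user_params = [] then pvOrFirst default_rule credit_rules
    else
      let nu := pvNormDict user_params
      match aPhase1 credit_rules nu with
      | some r => some r
      | none =>
        match aPhase2 credit_rules nu none 0 with
        | some b => if b = [] then pvOrFirst default_rule credit_rules else some b
        | none => pvOrFirst default_rule credit_rules

-- ===== PORT B =====
-- B, single merged loop: early return on exact match, otherwise track best partial; after the
-- loop 'return best_match if best_match else fallback' (truthiness as in the Python)
def bLoop (rules : List (List (String × List (String × String)))) (nu : PySem.Dict String String) (best : Option (List (String × List (String × String)))) (cnt : Int) (fb : Option (List (String × List (String × String)))) : Option (List (String × List (String × String))) :=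
  match rules with
  | [] =>
    match best with
    | some b => if b = [] then fb else some b
    | none => fb
  | r :: rs =>
    let attrs := (pvAget r "attributes").getD []
    if attrs = [] ∨ pvAget attrs "default" == some "enabled" then bLoop rs nu best cnt fb
    else
      let na := pvNormDict attrs
      let mc : Int := (na.items.countP (fun p => nu.get? p.1 == some p.2) : Int)
      if mc = (na.items.length : Int) then some r
      else if mc > cnt then bLoop rs nu (some r) mc fb
      else bLoop rs nu best cnt fb

def select_credit_rule_by_params_alt (credit_rules : List (List (String × List (String × String)))) (user_params : List (String × String)) : Option (List (String × List (String × String))) :=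
  if credit_rules = [] then none
  else
    let default_rule := credit_rules.find? (fun rule => pvAget ((pvAget rule "attributes").getD []) "default" == some "enabled")
    let fb := pvOrFirst default_rule credit_rules
    if user_params = [] then fb
    else bLoop credit_rules (pvNormDict user_params) none 0 fb

-- ===== PRECONDITION & SPEC =====
def Spec_select_credit_rule_by_params (credit_rules : List (List (String × List (String × String)))) (user_params : List (String × String)) (out : Option (List (String × List (String × String)))) : Prop := out = select_credit_rule_by_params_alt credit_rules user_params
instance (credit_rules : List (List (String × List (String × String)))) (user_params : List (String × String)) (out : Option (List (String × List (String × String)))) : Decidable (Spec_select_credit_rule_by_params credit_rules user_params out) := by unfold Spec_select_credit_rule_by_params; infer_instance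

-- ===== CLAIM (what is proved, stated in full; the proofs are below) =====
def Claim_equal_select_credit_rule_by_params : Prop := ∀ (credit_rules : List (List (String × List (String × String)))) (user_params : List (String × String)), Dom_select_credit_rule_by_params credit_rules user_params → Spec_select_credit_rule_by_params credit_rules user_params (select_credit_rule_by_params credit_rules user_params)

-- ===== LEMMAS AND PROOFS =====

-- the full-match test of A ('all attrs match') coincides with B's count test
theorem all_eq_count (l : List (String × String)) (nu : PySem.Dict String String) :
    (l.all (fun p => nu.get? p.1 == some p.2)) = true ↔
      ((l.countP (fun p => nu.get? p.1 == some p.2) : Int) = (l.length : Int)) := by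
  simp only [Nat.cast_inj, List.countP_eq_length, List.all_eq_true]

-- the merged loop equals "first exact match, else the best-partial fold, else fallback"
theorem bLoop_eq (nu : PySem.Dict String String) (fb : Option (List (String × List (String × String)))) :
    ∀ (rules : List (List (String × List (String × String)))) (best : Option (List (String × List (String × String)))) (cnt : Int),
      bLoop rules nu best cnt fb =
        match aPhase1 rules nu with
        | some r => some r
        | none =>
          match aPhase2 rules nu best cnt with
          | some b => if b = [] then fb else some b
          | none => fb := by
  intro rules
  induction rules with
  | nil => intro best cnt; cases best <;> simp [bLoop, aPhase1, aPhase2]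
  | cons r rs ih =>
    intro best cnt
    simp only [bLoop, aPhase1, aPhase2]
    by_cases h1 : (pvAget r "attributes").getD [] = []
    · simp [h1, ih]
    · by_cases h2 : pvAget ((pvAget r "attributes").getD []) "default" == some "enabled"
      · simp [h1, h2, ih]
      · have hc := all_eq_count (pvNormDict ((pvAget r "attributes").getD [])).items nu
        by_cases h3 : ((pvNormDict ((pvAget r "attributes").getD [])).items.countP
            (fun p => nu.get? p.1 == some p.2) : Int) =
            (((pvNormDict ((pvAget r "attributes").getD [])).items.length : Nat) : Int)
        · have hall := hc.mpr h3
          simp [h1, h2, h3, hall]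
        · have hall : ¬ ((pvNormDict ((pvAget r "attributes").getD [])).items.all
              (fun p => nu.get? p.1 == some p.2)) = true := fun h => h3 (hc.mp h)
          by_cases h4 : ((pvNormDict ((pvAget r "attributes").getD [])).items.countP
              (fun p => nu.get? p.1 == some p.2) : Int) > cnt
          · simp [h1, h2, h3, h4, hall, ih]
          · simp [h1, h2, h3, h4, hall, ih]

-- ===== VERDICT (by name: the statement is the Claim_ definition above) =====
theorem select_credit_rule_by_params_spec : Claim_equal_select_credit_rule_by_params := by
  intro credit_rules user_params _dom
  unfold Spec_select_credit_rule_by_params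
  unfold select_credit_rule_by_params select_credit_rule_by_params_alt
  by_cases hcr : credit_rules = []
  · simp [hcr]
  · by_cases hup : user_params = []
    · simp [hcr, hup]
    · simp only [hcr, hup, if_false]
      rw [bLoop_eq]
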